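-- pv_equiv track=rewrite | github.com/Ahmed-Abouzeid/MMSS_extended | utils.py | chunk_timestamps
-- ===== SOURCE A (Python) =====
-- def chunk_timestamps(timestamps, realization_bounds):
--     """function to transform timestamps into chunks per hour/or some minutes, in order to be able to evaluate
--      Hawkes simulation results per each time realization"""
--
--     timestamps_per_realization = []
--     for user_id in timestamps.keys():
--         user_chunks = []
--         for e, bound in enumerate(realization_bounds):
--             chunk = []
--             for t in timestamps[user_id]:
--
--                 if e * realization_bounds[0] < t <= bound:
--                     chunk.append(t)
--
--             user_chunks.append(chunk)
--
--         timestamps_per_realization.append(user_chunks)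
--
--     return timestamps_per_realization
-- ===== SOURCE B (Python) =====
-- def _bisect_right(values, x):
--     """Hand-written bisect_right (no imports in the original module)."""
--     lo, hi = 0, len(values)
--     while lo < hi:
--         mid = (lo + hi) // 2
--         if x < values[mid]:
--             hi = mid
--         else:
--             lo = mid + 1
--     return lo
--
--
-- def chunk_timestamps(timestamps, realization_bounds):
--     """Sort each user's timestamps once (by value, keeping original indices);
--     each chunk (e*bounds[0], bounds[e]] is then a contiguous slice of the sorted
--     values found by two binary searches; re-sorting the slice's original indices
--     restores the original order A emits."""
--     first_bound = realization_bounds[0] if realization_bounds else 0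
--     result = []
--     for ts in timestamps.values():
--         order = sorted(range(len(ts)), key=lambda i: ts[i])
--         values = [ts[i] for i in order]
--         user_chunks = []
--         for e, bound in enumerate(realization_bounds):
--             lo = _bisect_right(values, e * first_bound)
--             hi = _bisect_right(values, bound)
--             user_chunks.append([ts[i] for i in sorted(order[lo:hi])])
--         result.append(user_chunks)
--     return result
-- ===== Notes on version B (the rewrite author's own statement) =====
-- stated objective: alternative
-- what changed: Instead of rescanning every timestamp once per bound, B sorts each user's timestamps once (keeping original indices) and finds each chunk as a contiguous slice of the sorted values via two binary searches, re-sorting the slice's indices to restore the original emission order.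
import Mathlib
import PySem

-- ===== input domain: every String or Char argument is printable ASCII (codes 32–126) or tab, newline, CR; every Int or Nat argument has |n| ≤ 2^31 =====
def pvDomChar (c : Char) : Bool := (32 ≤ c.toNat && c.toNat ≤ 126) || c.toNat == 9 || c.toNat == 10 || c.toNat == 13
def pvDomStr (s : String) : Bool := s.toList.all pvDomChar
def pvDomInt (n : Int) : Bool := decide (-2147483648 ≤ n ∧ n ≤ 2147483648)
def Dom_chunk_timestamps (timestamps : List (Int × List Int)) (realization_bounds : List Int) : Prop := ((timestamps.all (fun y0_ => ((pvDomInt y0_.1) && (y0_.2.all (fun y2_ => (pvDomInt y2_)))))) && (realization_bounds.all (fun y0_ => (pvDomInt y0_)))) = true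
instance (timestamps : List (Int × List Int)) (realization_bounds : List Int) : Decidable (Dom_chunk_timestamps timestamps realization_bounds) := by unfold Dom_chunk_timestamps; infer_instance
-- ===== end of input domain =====

-- B replaces A's per-bound rescan of all timestamps by one sort of each user's
-- timestamps plus two binary searches per bound (objective: alternative algorithm).

-- ===== PORT A =====
-- Literal port of A: for each dict entry, for each (e, bound) in enumerate(realization_bounds),
-- scan the user's timestamps and append those with e*realization_bounds[0] < t <= bound.
-- realization_bounds[0] is ported as pyGetD … 0 0: it is only evaluated inside the enumerate
-- loop, where the list is nonempty, so the default is never read (exact).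
def chunk_timestamps (timestamps : List (Int × List Int)) (realization_bounds : List Int) : List (List (List Int)) :=
  timestamps.foldl (fun acc kv =>
    let user_chunks := (PySem.List.enumerate realization_bounds).foldl (fun uc eb =>
      let chunk := kv.2.foldl (fun ch t =>
        if eb.1 * PySem.List.pyGetD realization_bounds 0 0 < t ∧ t ≤ eb.2 then ch ++ [t] else ch) []
      uc ++ [chunk]) []
    acc ++ [user_chunks]) []

-- ===== PORT B =====
-- Port of _bisect_right's while-loop (lo, hi are nonnegative Python ints, so Nat;
-- values[mid] is always in range there, ported as getD — exact).
def pvBisect (values : List Int) (x : Int) (lo hi : Nat) : Nat :=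
  if _h : lo < hi then
    let mid := (lo + hi) / 2
    if x < values.getD mid 0 then pvBisect values x lo mid
    else pvBisect values x (mid + 1) hi
  else lo
termination_by hi - lo
decreasing_by all_goals omega

-- Port of B: per user, sort the indices by timestamp value; per bound take the
-- contiguous run [lo:hi) of the sorted values found by two binary searches
-- (order[lo:hi] with 0 ≤ lo ≤ len is exactly drop lo / take (hi-lo)), and re-sort
-- the run's original indices to emit the chunk in original order.
def chunk_timestamps_alt (timestamps : List (Int × List Int)) (realization_bounds : List Int) : List (List (List Int)) :=
  let first_bound := match realization_bounds with | [] => (0 : Int) | x :: _ => x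
  timestamps.foldl (fun result kv =>
    let ts := kv.2
    let order := PySem.List.sorted (List.range ts.length) (fun i => ts.getD i 0)
    let values := order.map (fun i => ts.getD i 0)
    let user_chunks := (PySem.List.enumerate realization_bounds).foldl (fun uc eb =>
      let lo := pvBisect values (eb.1 * first_bound) 0 values.length
      let hi := pvBisect values eb.2 0 values.length
      uc ++ [(PySem.List.sorted ((order.drop lo).take (hi - lo)) (fun i => i)).map
               (fun i => ts.getD i 0)]) []
    result ++ [user_chunks]) []

-- ===== PRECONDITION & SPEC =====
def Spec_chunk_timestamps (timestamps : List (Int × List Int)) (realization_bounds : List Int) (out : List (List (List Int))) : Prop := out = chunk_timestamps_alt timestamps realization_bounds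
instance (timestamps : List (Int × List Int)) (realization_bounds : List Int) (out : List (List (List Int))) : Decidable (Spec_chunk_timestamps timestamps realization_bounds out) := by unfold Spec_chunk_timestamps; infer_instance

-- ===== CLAIM (what is proved, stated in full; the proofs are below) =====
def Claim_equal_chunk_timestamps : Prop := ∀ (timestamps : List (Int × List Int)) (realization_bounds : List Int), Dom_chunk_timestamps timestamps realization_bounds → Spec_chunk_timestamps timestamps realization_bounds (chunk_timestamps timestamps realization_bounds)

-- ===== LEMMAS AND PROOFS =====

-- Binary-search invariant: on a ≤-sorted list with the ≤-x region bracketed by [lo, hi),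
-- pvBisect returns the boundary r with values[j] ≤ x exactly for j < r.
theorem pvBisect_spec (values : List Int) (x : Int) (hs : values.Pairwise (· ≤ ·)) :
    ∀ lo hi, lo ≤ hi → hi ≤ values.length →
    (∀ j, j < lo → values.getD j 0 ≤ x) →
    (∀ j, hi ≤ j → j < values.length → x < values.getD j 0) →
    (∀ j, j < pvBisect values x lo hi → values.getD j 0 ≤ x) ∧
    (∀ j, pvBisect values x lo hi ≤ j → j < values.length → x < values.getD j 0) := by
  intro lo hi
  induction hn : hi - lo using Nat.strong_induction_on generalizing lo hi with
  | _ n ih =>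
    intro hlh hhl hlo hhi
    rw [pvBisect]
    by_cases h : lo < hi
    · simp only [h, dif_pos]
      have hmid1 : (lo + hi) / 2 < hi := by omega
      have hmid2 : lo ≤ (lo + hi) / 2 := by omega
      have hmlen : (lo + hi) / 2 < values.length := by omega
      by_cases hc : x < values.getD ((lo + hi) / 2) 0
      · simp only [hc, if_pos]
        subst hn
        exact ih ((lo + hi) / 2 - lo) (by omega) lo ((lo + hi) / 2) rfl (by omega) (by omega) hlo
          (fun j hj hjl => by
            have hmono : values.getD ((lo + hi) / 2) 0 ≤ values.getD j 0 := by
              rcases Nat.eq_or_lt_of_le hj with h' | h'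
              · rw [h']
              · have := List.pairwise_iff_getElem.mp hs ((lo + hi) / 2) j hmlen hjl h'
                simpa [List.getD_eq_getElem?_getD, List.getElem?_eq_getElem, hmlen, hjl] using this
            exact lt_of_lt_of_le hc hmono)
      · simp only [hc, if_false]
        rw [Int.not_lt] at hc
        subst hn
        exact ih (hi - ((lo + hi) / 2 + 1)) (by omega) ((lo + hi) / 2 + 1) hi rfl (by omega) (by omega)
          (fun j hj => by
            have hjlen : j < values.length := by omega
            have hmono : values.getD j 0 ≤ values.getD ((lo + hi) / 2) 0 := by
              rcases Nat.lt_or_ge j ((lo + hi) / 2) with h' | h'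
              · have := List.pairwise_iff_getElem.mp hs j ((lo + hi) / 2) hjlen hmlen h'
                simpa [List.getD_eq_getElem?_getD, List.getElem?_eq_getElem, hmlen, hjlen] using this
              · have : j = (lo + hi) / 2 := by omega
                rw [this]
            exact le_trans hmono hc)
          hhi
    · rw [dif_neg h]
      exact ⟨fun j hj => hlo j hj, fun j hj hjl => hhi j (by omega) hjl⟩

-- Full-range corollary: position p (p < len) satisfies values[p] ≤ x iff p < bisect_right x.
theorem pvBisect_char (values : List Int) (x : Int) (hs : values.Pairwise (· ≤ ·))
    (p : Nat) (hp : p < values.length) :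
    values.getD p 0 ≤ x ↔ p < pvBisect values x 0 values.length := by
  obtain ⟨h1, h2⟩ := pvBisect_spec values x hs 0 values.length (Nat.zero_le _) le_rfl
    (fun j hj => absurd hj (Nat.not_lt_zero j)) (fun j hj hjl => absurd hjl (by omega))
  constructor
  · intro hle
    by_contra hnot
    exact absurd (h2 p (by omega) hp) (not_lt.mpr hle)
  · intro hlt
    exact h1 p hlt

-- A predicate holding exactly on positions [lo, hi) selects exactly the slice drop lo / take (hi-lo).
theorem filter_eq_drop_take {α : Type} (l : List α) (q : α → Bool) :
    ∀ lo hi : Nat,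
    (∀ p (hp : p < l.length), q l[p] = true ↔ (lo ≤ p ∧ p < hi)) →
    l.filter q = (l.drop lo).take (hi - lo) := by
  induction l with
  | nil => intro lo hi _; simp
  | cons a l ih =>
    intro lo hi hq
    have hqa := hq 0 (by simp)
    simp only [List.getElem_cons_zero] at hqa
    by_cases hlo : lo = 0
    · subst hlo
      by_cases hhi : hi = 0
      · subst hhi
        have hqf : q a = false := by
          rcases Bool.eq_false_or_eq_true (q a) with h | h
          · exact absurd (hqa.mp h) (by omega)
          · exact h
        rw [List.filter_cons_of_neg (by simp [hqf])]
        rw [ih 0 0 (fun p hp => by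
          have h := hq (p + 1) (by simpa using Nat.succ_lt_succ hp)
          simp only [List.getElem_cons_succ] at h
          constructor
          · intro hx; have := h.mp hx; omega
          · intro hx; omega)]
        simp
      · have hqt : q a = true := hqa.mpr ⟨Nat.zero_le _, by omega⟩
        rw [List.filter_cons_of_pos hqt]
        rw [ih 0 (hi - 1) (fun p hp => by
          have h := hq (p + 1) (by simpa using Nat.succ_lt_succ hp)
          simp only [List.getElem_cons_succ] at h
          constructor
          · intro hx; have := h.mp hx; exact ⟨Nat.zero_le _, by omega⟩
          · intro hx; exact h.mpr ⟨Nat.zero_le _, by omega⟩)]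
        simp only [List.drop_zero, Nat.sub_zero]
        rw [List.take_cons (by omega)]
    · obtain ⟨k, rfl⟩ := Nat.exists_eq_succ_of_ne_zero hlo
      have hqf : q a = false := by
        rcases Bool.eq_false_or_eq_true (q a) with h | h
        · exact absurd (hqa.mp h) (by omega)
        · exact h
      rw [List.filter_cons_of_neg (by simp [hqf])]
      rw [ih k (hi - 1) (fun p hp => by
        have h := hq (p + 1) (by simpa using Nat.succ_lt_succ hp)
        simp only [List.getElem_cons_succ] at h
        constructor
        · intro hx; have := h.mp hx; omega
        · intro hx; exact h.mpr ⟨by omega, by omega⟩)]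
      rw [List.drop_succ_cons]
      congr 1
      omega

-- range n mapped through getD recovers the list.
theorem map_getD_range (ts : List Int) :
    (List.range ts.length).map (fun i => ts.getD i 0) = ts := by
  apply List.ext_getElem
  · simp
  · intro i h1 h2
    simp [List.getD_eq_getElem?_getD, h2]

-- one user's chunk for one bound: B's sort + two bisects + index re-sort equals A's filter
-- One user's chunk for one bound: B's sort + two bisects + index re-sort equals A's filter.
theorem chunk_eq (ts : List Int) (x1 x2 : Int) :
    (PySem.List.sorted
        (((PySem.List.sorted (List.range ts.length) (fun i => ts.getD i 0)).drop
            (pvBisect ((PySem.List.sorted (List.range ts.length) (fun i => ts.getD i 0)).map (fun i => ts.getD i 0)) x1 0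
              ((PySem.List.sorted (List.range ts.length) (fun i => ts.getD i 0)).map (fun i => ts.getD i 0)).length)).take
          (pvBisect ((PySem.List.sorted (List.range ts.length) (fun i => ts.getD i 0)).map (fun i => ts.getD i 0)) x2 0
              ((PySem.List.sorted (List.range ts.length) (fun i => ts.getD i 0)).map (fun i => ts.getD i 0)).length -
            pvBisect ((PySem.List.sorted (List.range ts.length) (fun i => ts.getD i 0)).map (fun i => ts.getD i 0)) x1 0
              ((PySem.List.sorted (List.range ts.length) (fun i => ts.getD i 0)).map (fun i => ts.getD i 0)).length))
        (fun i => i)).map (fun i => ts.getD i 0)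
      = ts.filter (fun t => decide (x1 < t ∧ t ≤ x2)) := by
  set g : Nat → Int := fun i => ts.getD i 0 with hg
  set order := PySem.List.sorted (List.range ts.length) g with horder
  set values := order.map g with hvalues
  set lo := pvBisect values x1 0 values.length with hlo
  set hi := pvBisect values x2 0 values.length with hhi
  set q : Nat → Bool := fun i => decide (x1 < g i ∧ g i ≤ x2) with hq
  have hperm : order.Perm (List.range ts.length) := PySem.List.sorted_perm _ _ _
  have hsorted : values.Pairwise (· ≤ ·) := by
    rw [hvalues]
    exact List.pairwise_map.mpr (PySem.List.sorted_pairwise _ g)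
  have hlenv : values.length = order.length := by simp [hvalues]
  have hvget : ∀ (p : Nat) (hp : p < order.length), values.getD p 0 = g (order[p]'hp) := by
    intro p hp
    have hpv : p < values.length := by omega
    rw [List.getD_eq_getElem?_getD, List.getElem?_eq_getElem hpv]
    simp [hvalues]
  have hchar1 := fun p hp => pvBisect_char values x1 hsorted p hp
  have hchar2 := fun p hp => pvBisect_char values x2 hsorted p hp
  have hpos : ∀ p (hp : p < order.length), q order[p] = true ↔ (lo ≤ p ∧ p < hi) := by
    intro p hp
    have hpv : p < values.length := by omega
    have h1 := hchar1 p hpv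
    have h2 := hchar2 p hpv
    rw [hvget p hp] at h1 h2
    simp only [hq, decide_eq_true_eq]
    rw [← hlo] at h1
    rw [← hhi] at h2
    constructor
    · rintro ⟨ha, hb⟩
      exact ⟨by have := h1.mpr; by_contra hc; exact absurd (h1.2 (by omega)) (not_le.mpr ha), h2.mp hb⟩
    · rintro ⟨ha, hb⟩
      refine ⟨?_, h2.mpr hb⟩
      by_contra hc
      rw [Int.not_lt] at hc
      exact absurd (h1.mp hc) (by omega)
  have hslice : (order.drop lo).take (hi - lo) = order.filter q :=
    (filter_eq_drop_take order q lo hi hpos).symm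
  rw [hslice]
  have hpair : ((List.range ts.length).filter q).Pairwise (fun a b => a < b) :=
    List.Pairwise.sublist List.filter_sublist List.pairwise_lt_range
  have hsorteq : PySem.List.sorted (order.filter q) (fun i => i) = (List.range ts.length).filter q :=
    PySem.List.sorted_eq_of_perm_of_pairwise_lt _ _ _ ((hperm.symm).filter q) hpair
  rw [hsorteq]
  calc ((List.range ts.length).filter q).map g
      = (((List.range ts.length).map g).filter (fun t => decide (x1 < t ∧ t ≤ x2))) := by
        rw [List.filter_map]; rfl
    _ = ts.filter (fun t => decide (x1 < t ∧ t ≤ x2)) := by rw [map_getD_range]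

-- ===== VERDICT (by name: the statement is the Claim_ definition above) =====
theorem chunk_timestamps_spec : Claim_equal_chunk_timestamps := by
  intro timestamps realization_bounds _
  unfold Spec_chunk_timestamps chunk_timestamps chunk_timestamps_alt
  rw [PySem.List.foldl_append_singleton_eq_map]
  rw [PySem.List.foldl_append_singleton_eq_map]
  refine List.map_congr_left (fun kv _ => ?_)
  rw [PySem.List.foldl_append_singleton_eq_map]
  rw [PySem.List.foldl_append_singleton_eq_map]
  cases realization_bounds with
  | nil => simp [PySem.List.enumerate]
  | cons b0 bs =>
    simp only [List.nil_append]
    refine List.map_congr_left (fun eb _ => ?_)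
    have hA : kv.2.foldl (fun ch t =>
        if eb.1 * PySem.List.pyGetD (b0 :: bs) 0 0 < t ∧ t ≤ eb.2 then ch ++ [t] else ch) []
        = kv.2.filter (fun t => decide (eb.1 * b0 < t ∧ t ≤ eb.2)) := by
      have := PySem.List.foldl_append_if (fun t => decide (eb.1 * b0 < t ∧ t ≤ eb.2)) id kv.2 []
      simp only [decide_eq_true_eq, List.map_id, List.nil_append] at this
      simpa [PySem.List.pyGetD] using this
    rw [hA]
    exact (chunk_eq kv.2 (eb.1 * b0) eb.2).symm
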